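-- pv_equiv track=rewrite | github.com/silam741852963/web2product-catalog | scripts/components/source_loader.py | _resolve_keys
-- ===== SOURCE A (Python) =====
-- from typing import Dict, Iterable, Iterator, List, Optional, Sequence, Set, Tuple
--
-- _PRIMARY_ID_KEYS = ("bvdid", "hojin_id", "id")
--
-- _PRIMARY_NAME_KEYS = ("name", "company_name", "company")
--
-- _PRIMARY_URL_KEYS = ("url", "website", "homepage", "home_page")
--
-- def _resolve_keys(fieldnames: Optional[Sequence[str]]) -> Tuple[str, str, str]:
--     """
--     Pick header names (case-insensitive) for (id, name, url).
--     Returns **original-cased** names from the file ('' if not found).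
--     """
--     fset = {(fn or "").strip().lower(): fn for fn in (fieldnames or [])}
--
--     def pick(candidates: Sequence[str]) -> str:
--         for c in candidates:
--             if c in fset:
--                 return fset[c]
--         return ""
--
--     return (
--         pick(_PRIMARY_ID_KEYS),
--         pick(_PRIMARY_NAME_KEYS),
--         pick(_PRIMARY_URL_KEYS),
--     )
-- ===== SOURCE B (Python) =====
-- _PRIMARY_ID_KEYS = ("bvdid", "hojin_id", "id")
-- _PRIMARY_NAME_KEYS = ("name", "company_name", "company")
-- _PRIMARY_URL_KEYS = ("url", "website", "homepage", "home_page")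
--
--
-- def _resolve_keys(fieldnames):
--     """Single pass over the header row: for each of the three slots keep the
--     best-ranked (and, among equally ranked, latest) matching column."""
--     groups = (_PRIMARY_ID_KEYS, _PRIMARY_NAME_KEYS, _PRIMARY_URL_KEYS)
--     best = [None, None, None]  # per slot: (rank within its key group, original name)
--     for fn in fieldnames or []:
--         norm = (fn or "").strip().lower()
--         for slot, keys in enumerate(groups):
--             if norm in keys:
--                 rank = keys.index(norm)
--                 if best[slot] is None or rank <= best[slot][0]:
--                     best[slot] = (rank, fn)
--     return tuple(b[1] if b else "" for b in best)
-- ===== Notes on version B (the rewrite author's own statement) =====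
-- stated objective: alternative
-- what changed: B replaces A's normalized-name dict plus per-slot candidate lookups by a single pass over the fieldnames that keeps, for each of the three slots, the best-ranked matching column seen so far (later equally-ranked columns override).
import Mathlib
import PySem

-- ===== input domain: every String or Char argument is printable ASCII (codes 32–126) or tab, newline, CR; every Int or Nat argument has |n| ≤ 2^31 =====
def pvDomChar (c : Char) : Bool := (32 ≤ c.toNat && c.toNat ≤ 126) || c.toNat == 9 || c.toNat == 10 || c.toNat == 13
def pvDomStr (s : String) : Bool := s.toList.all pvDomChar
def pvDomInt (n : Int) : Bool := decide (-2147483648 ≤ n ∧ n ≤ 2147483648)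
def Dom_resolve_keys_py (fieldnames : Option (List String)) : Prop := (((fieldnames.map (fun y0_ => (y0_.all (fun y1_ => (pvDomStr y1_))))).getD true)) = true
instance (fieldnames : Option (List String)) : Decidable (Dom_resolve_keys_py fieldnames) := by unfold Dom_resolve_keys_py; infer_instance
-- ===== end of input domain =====

-- B replaces A's normalized-name dict and per-slot candidate lookups by one pass over the
-- fieldnames keeping the best-ranked match per slot (alternative decomposition, same cost class).


-- ===== PORT A =====
-- A builds a dict from normalized fieldname to original fieldname (last wins), then looks candidates up.
-- '(fn or "").strip().lower()': for a str argument, 'fn or ""' is fn itself ('' stays ''), so normalization is strip then lower.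
def pvNorm (fn : String) : String := PySem.Str.lower (PySem.Str.strip fn)

def pvFset (fieldnames : Option (List String)) : PySem.Dict String String :=
  (fieldnames.getD []).foldl (fun d fn => d.insert (pvNorm fn) fn) PySem.Dict.empty

def pvPickA (fset : PySem.Dict String String) : List String → String
  | [] => ""
  | c :: rest => if fset.contains c then fset.getD c "" else pvPickA fset rest

def resolve_keys_py (fieldnames : Option (List String)) : String × String × String :=
  let fset := pvFset fieldnames
  (pvPickA fset ["bvdid", "hojin_id", "id"],
   pvPickA fset ["name", "company_name", "company"],
   pvPickA fset ["url", "website", "homepage", "home_page"])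

-- ===== PORT B =====
-- B scans the fieldnames ONCE, keeping per slot the best-ranked (and among equal ranks the
-- latest) matching column as '(rank, original name)'.
def pvIdKeys : List String := ["bvdid", "hojin_id", "id"]
def pvNameKeys : List String := ["name", "company_name", "company"]
def pvUrlKeys : List String := ["url", "website", "homepage", "home_page"]

-- one slot update: 'if norm in keys: rank = keys.index(norm); if best is None or rank <= best[0]: …'
def pvStepSlot (keys : List String) (b : Option (Nat × String)) (norm fn : String) : Option (Nat × String) :=
  if norm ∈ keys then
    match PySem.List.index? keys norm with
    | some rank =>
      match b with
      | none => some (rank, fn)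
      | some (rb, _) => if rank ≤ rb then some (rank, fn) else b
    | none => b      -- unreachable: norm ∈ keys
  else b

def pvStep3 (best : Option (Nat × String) × Option (Nat × String) × Option (Nat × String))
    (fn : String) : Option (Nat × String) × Option (Nat × String) × Option (Nat × String) :=
  let norm := pvNorm fn
  (pvStepSlot pvIdKeys best.1 norm fn,
   pvStepSlot pvNameKeys best.2.1 norm fn,
   pvStepSlot pvUrlKeys best.2.2 norm fn)

def pvRender : Option (Nat × String) → String
  | none => ""
  | some (_, n) => n

def resolve_keys_py_alt (fieldnames : Option (List String)) : String × String × String :=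
  let fields := fieldnames.getD []
  let best := fields.foldl pvStep3 (none, none, none)
  (pvRender best.1, pvRender best.2.1, pvRender best.2.2)

-- ===== PRECONDITION & SPEC =====
def Spec_resolve_keys_py (fieldnames : Option (List String)) (out : String × String × String) : Prop := out = resolve_keys_py_alt fieldnames
instance (fieldnames : Option (List String)) (out : String × String × String) : Decidable (Spec_resolve_keys_py fieldnames out) := by unfold Spec_resolve_keys_py; infer_instance

-- ===== CLAIM (what is proved, stated in full; the proofs are below) =====
def Claim_equal_resolve_keys_py : Prop := ∀ (fieldnames : Option (List String)), Dom_resolve_keys_py fieldnames → Spec_resolve_keys_py fieldnames (resolve_keys_py fieldnames)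

-- ===== LEMMAS AND PROOFS =====

-- Reference function: last fieldname whose normalized form is c.
def pvLast (l : List String) (c : String) : Option String :=
  l.foldl (fun acc fn => if pvNorm fn = c then some fn else acc) none

-- Reference pick: first candidate with a match, rendered by pvLast.
def pvPickLast (fields : List String) : List String → String
  | [] => ""
  | c :: rest =>
    match pvLast fields c with
    | some m => m
    | none => pvPickLast fields rest

-- A's dict lookup equals the last-match fold over the fieldnames.
theorem pv_get_eq_fold (fields : List String) (d : PySem.Dict String String) (c : String) :
    (fields.foldl (fun d fn => d.insert (pvNorm fn) fn) d).get? c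
      = fields.foldl (fun acc fn => if pvNorm fn = c then some fn else acc) (d.get? c) := by
  induction fields generalizing d with
  | nil => rfl
  | cons fn rest ih =>
    simp only [List.foldl_cons]
    refine (ih _).trans (congrArg (fun o => List.foldl (fun acc fn => if pvNorm fn = c then some fn else acc) o rest) ?_)
    by_cases h : c = pvNorm fn
    · subst h
      rw [PySem.Dict.get?_insert_self, if_pos rfl]
    · rw [PySem.Dict.get?_insert_of_ne _ _ h, if_neg (fun hc => h hc.symm)]

-- A's pick over the built dict equals the reference pick.
theorem pv_pickA_eq (fields : List String) (cs : List String) :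
    pvPickA (fields.foldl (fun d fn => d.insert (pvNorm fn) fn) PySem.Dict.empty) cs
      = pvPickLast fields cs := by
  induction cs with
  | nil => rfl
  | cons c rest ih =>
    simp only [pvPickA, pvPickLast]
    rw [PySem.Dict.contains_eq_isSome_get?, PySem.Dict.getD_eq_get?_getD,
        pv_get_eq_fold fields PySem.Dict.empty c, PySem.Dict.get?_empty]
    cases hm : fields.foldl (fun acc fn => if pvNorm fn = c then some fn else acc) none with
    | none => simpa [pvLast, hm] using ih
    | some m => simp [pvLast, hm]

-- B's single-slot fold, per key list.
def pvBest (keys l : List String) : Option (Nat × String) :=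
  l.foldl (fun b fn => pvStepSlot keys b (pvNorm fn) fn) none

-- B's triple fold splits into three independent slot folds.
theorem pv_foldl3 (l : List String)
    (a b c : Option (Nat × String)) :
    l.foldl pvStep3 (a, b, c)
      = (l.foldl (fun s fn => pvStepSlot pvIdKeys s (pvNorm fn) fn) a,
         l.foldl (fun s fn => pvStepSlot pvNameKeys s (pvNorm fn) fn) b,
         l.foldl (fun s fn => pvStepSlot pvUrlKeys s (pvNorm fn) fn) c) := by
  induction l generalizing a b c with
  | nil => rfl
  | cons fn rest ih => simp only [List.foldl_cons, pvStep3, ih]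

def pvInv (keys l : List String) : Prop :=
  match pvBest keys l with
  | none => ∀ c ∈ keys, pvLast l c = none
  | some (r, n) =>
      (∀ i c, i < r → keys[i]? = some c → pvLast l c = none) ∧
      (∃ c, keys[r]? = some c ∧ pvLast l c = some n)

theorem pvLast_append (l : List String) (fn c : String) :
    pvLast (l ++ [fn]) c = if pvNorm fn = c then some fn else pvLast l c := by
  simp [pvLast, List.foldl_append]

theorem pv_inv (keys l : List String) : pvInv keys l := by
  induction l using List.reverseRecOn with
  | nil =>
    show ∀ c ∈ keys, pvLast [] c = none
    intro c _; rfl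
  | append_singleton l fn ih =>
    have hb : pvBest keys (l ++ [fn]) = pvStepSlot keys (pvBest keys l) (pvNorm fn) fn := by
      simp [pvBest, List.foldl_append]
    have memOf : ∀ {i : Nat} {c : String}, keys[i]? = some c → c ∈ keys := by
      intro i c h
      rcases List.getElem?_eq_some_iff.mp h with ⟨hlt, hc⟩
      exact hc ▸ List.getElem_mem hlt
    unfold pvInv at ih ⊢
    by_cases hmem : pvNorm fn ∈ keys
    · have hsome : (PySem.List.index? keys (pvNorm fn)).isSome = true :=
        (PySem.List.index?_isSome_iff keys (pvNorm fn)).mpr hmem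
      obtain ⟨k, hk⟩ := Option.isSome_iff_exists.mp hsome
      obtain ⟨hklt, hkeq, hkmin⟩ := PySem.List.getElem_of_index?_eq_some hk
      have hAtK : pvLast (l ++ [fn]) keys[k] = some fn := by
        rw [pvLast_append, if_pos hkeq.symm]
      have hKel : keys[k]? = some keys[k] := List.getElem?_eq_getElem hklt
      have hkeepLt : ∀ i c, i < k → keys[i]? = some c → pvLast (l ++ [fn]) c = pvLast l c := by
        intro i c hik hic
        have hilt : i < keys.length := Nat.lt_trans hik hklt
        have hci : keys[i] = c := by simpa [List.getElem?_eq_getElem hilt] using hic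
        rw [pvLast_append, if_neg (fun h => hkmin i hik (hci.trans h.symm))]
      cases hbl : pvBest keys l with
      | none =>
        rw [hbl] at ih
        have hstep : pvStepSlot keys none (pvNorm fn) fn = some (k, fn) := by
          unfold pvStepSlot; rw [if_pos hmem, hk]
        rw [hb, hbl, hstep]
        exact ⟨fun i c hik hic => (hkeepLt i c hik hic).trans (ih c (memOf hic)),
               keys[k], hKel, hAtK⟩
      | some rn =>
        obtain ⟨rb, nb⟩ := rn
        rw [hbl] at ih
        obtain ⟨ihmin, cb, hcb, hcbl⟩ := ih
        by_cases hle : k ≤ rb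
        · have hstep : pvStepSlot keys (some (rb, nb)) (pvNorm fn) fn = some (k, fn) := by
            unfold pvStepSlot; rw [if_pos hmem, hk]; simp [hle]
          rw [hb, hbl, hstep]
          exact ⟨fun i c hik hic =>
                   (hkeepLt i c hik hic).trans (ihmin i c (Nat.lt_of_lt_of_le hik hle) hic),
                 keys[k], hKel, hAtK⟩
        · have hstep : pvStepSlot keys (some (rb, nb)) (pvNorm fn) fn = some (rb, nb) := by
            unfold pvStepSlot; rw [if_pos hmem, hk]; simp [hle]
          rw [hb, hbl, hstep]
          have hrbk : rb < k := Nat.lt_of_not_le hle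
          exact ⟨fun i c hirb hic =>
                   (hkeepLt i c (Nat.lt_trans hirb hrbk) hic).trans (ihmin i c hirb hic),
                 cb, hcb, (hkeepLt rb cb hrbk hcb).trans hcbl⟩
    · have hstep : pvStepSlot keys (pvBest keys l) (pvNorm fn) fn = pvBest keys l := by
        unfold pvStepSlot; rw [if_neg hmem]
      have hkeep : ∀ c ∈ keys, pvLast (l ++ [fn]) c = pvLast l c := by
        intro c hc
        rw [pvLast_append, if_neg (fun (h : pvNorm fn = c) => hmem (h ▸ hc))]
      rw [hb, hstep]
      cases hbl : pvBest keys l with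
      | none =>
        rw [hbl] at ih
        exact fun c hc => (hkeep c hc).trans (ih c hc)
      | some rn =>
        obtain ⟨rb, nb⟩ := rn
        rw [hbl] at ih
        obtain ⟨ihmin, cb, hcb, hcbl⟩ := ih
        exact ⟨fun i c hi hic => (hkeep c (memOf hic)).trans (ihmin i c hi hic),
               cb, hcb, (hkeep cb (memOf hcb)).trans hcbl⟩

theorem pv_pickLast_none (l : List String) (keys : List String)
    (h : ∀ c ∈ keys, pvLast l c = none) : pvPickLast l keys = "" := by
  induction keys with
  | nil => rfl
  | cons c rest ih =>
    simp only [pvPickLast, h c (List.mem_cons_self)]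
    exact ih fun c hc => h c (List.mem_cons_of_mem _ hc)

theorem pv_pickLast_some (l : List String) (keys : List String) (r : Nat) (n : String)
    (hmin : ∀ i c, i < r → keys[i]? = some c → pvLast l c = none)
    (hr : ∃ c, keys[r]? = some c ∧ pvLast l c = some n) : pvPickLast l keys = n := by
  induction keys generalizing r with
  | nil => obtain ⟨c, hc, _⟩ := hr; simp at hc
  | cons c0 rest ih =>
    cases r with
    | zero =>
      obtain ⟨c, hc, hlast⟩ := hr
      have : c = c0 := by simpa using hc.symm
      simp [pvPickLast, this ▸ hlast]
    | succ r' =>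
      have h0 : pvLast l c0 = none := hmin 0 c0 (Nat.succ_pos _) (by simp)
      simp only [pvPickLast, h0]
      refine ih r' (fun i c hi hic => hmin (i + 1) c (Nat.succ_lt_succ hi) (by simpa using hic)) ?_
      obtain ⟨c, hc, hlast⟩ := hr
      exact ⟨c, by simpa using hc, hlast⟩

theorem pv_slot_eq (keys l : List String) :
    pvRender (l.foldl (fun s fn => pvStepSlot keys s (pvNorm fn) fn) none) = pvPickLast l keys := by
  have hinv := pv_inv keys l
  unfold pvInv at hinv
  rw [show l.foldl (fun s fn => pvStepSlot keys s (pvNorm fn) fn) none = pvBest keys l from rfl]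
  cases hb : pvBest keys l with
  | none => rw [hb] at hinv; exact (pv_pickLast_none l keys hinv).symm
  | some rn =>
    obtain ⟨r, n⟩ := rn
    rw [hb] at hinv
    exact (pv_pickLast_some l keys r n hinv.1 hinv.2).symm

-- ===== VERDICT (by name: the statement is the Claim_ definition above) =====
theorem resolve_keys_py_spec : Claim_equal_resolve_keys_py := by
  intro fieldnames _
  show resolve_keys_py fieldnames = resolve_keys_py_alt fieldnames
  simp only [resolve_keys_py, resolve_keys_py_alt, pvFset]
  rw [pv_foldl3]
  simp only [pv_pickA_eq, pv_slot_eq, pvIdKeys, pvNameKeys, pvUrlKeys]
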